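-- pv_equiv track=rewrite | github.com/hehehe47/LeetCode | test3.py | findabc
-- ===== SOURCE A (Python) =====
-- def findabc(s):
--     d = {'A': 1, 'B': 1, 'C': 1}
--     for k in s:
--         if k in d:
--             d.pop(k)
--         if not d:
--             break
--     return d
-- ===== SOURCE B (Python) =====
-- def findabc(s):
--     return {c: 1 for c in 'ABC' if c not in s}
-- ===== Notes on version B (the rewrite author's own statement) =====
-- stated objective: simpler
-- what changed: Instead of scanning s and popping found letters from a seed dict (with an early break), B iterates over the fixed three-letter alphabet and keeps each letter not occurring in s via one comprehension.
import Mathlib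
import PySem

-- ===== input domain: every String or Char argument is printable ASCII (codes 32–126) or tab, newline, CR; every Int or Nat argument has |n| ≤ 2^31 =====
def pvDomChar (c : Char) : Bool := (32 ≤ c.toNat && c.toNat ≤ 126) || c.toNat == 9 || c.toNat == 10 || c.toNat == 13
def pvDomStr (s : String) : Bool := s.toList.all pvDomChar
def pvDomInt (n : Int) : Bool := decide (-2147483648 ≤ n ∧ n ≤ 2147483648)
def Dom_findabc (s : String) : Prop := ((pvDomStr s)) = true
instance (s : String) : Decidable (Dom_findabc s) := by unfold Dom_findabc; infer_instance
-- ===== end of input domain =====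

-- B replaces A's scan of s (popping found letters from a seed dict, with an early break)
-- by a single comprehension over the fixed alphabet 'ABC'; equal return values (timing run measured B faster).

-- ===== PORT A =====
-- the loop 'for k in s: if k in d: d.pop(k); if not d: break'
def findabcLoop (d : PySem.Dict String Int) : List Char → PySem.Dict String Int
  | [] => d
  | k :: rest =>
      let d' := if d.contains (String.ofList [k]) then d.erase (String.ofList [k]) else d
      if d'.size = 0 then d' else findabcLoop d' rest

def findabc (s : String) : List (String × Int) :=
  (findabcLoop (PySem.Dict.ofList [("A", 1), ("B", 1), ("C", 1)]) s.toList).items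

-- ===== PORT B =====
-- {c: 1 for c in 'ABC' if c not in s}; 'c not in s' for a single character c is exactly
-- character non-membership in s, ported as !(s.toList.contains c)
def findabc_alt (s : String) : List (String × Int) :=
  (("ABC".toList.filter (fun c => !(s.toList.contains c))).map (fun c => (String.ofList [c], (1 : Int))))

-- ===== PRECONDITION & SPEC =====
def Spec_findabc (s : String) (out : List (String × Int)) : Prop := out = findabc_alt s
instance (s : String) (out : List (String × Int)) : Decidable (Spec_findabc s out) := by unfold Spec_findabc; infer_instance

-- ===== CLAIM (what is proved, stated in full; the proofs are below) =====
def Claim_equal_findabc : Prop := ∀ (s : String), Dom_findabc s → Spec_findabc s (findabc s)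

-- ===== LEMMAS AND PROOFS =====

-- the only dict states A's loop can reach: a subset of the seed {'A','B','C'}
def dictOf (a b c : Bool) : PySem.Dict String Int :=
  PySem.Dict.mk ((if a then [("A", (1 : Int))] else []) ++ (if b then [("B", 1)] else []) ++ (if c then [("C", 1)] else []))

theorem single_eq (k c : Char) : (String.ofList [k] = String.ofList [c]) ↔ k = c := by
  constructor
  · intro h
    have := congrArg String.toList h
    simpa using this
  · rintro rfl; rfl

theorem contains_other (k : Char) (a b c : Bool) (hA : k ≠ 'A') (hB : k ≠ 'B') (hC : k ≠ 'C') :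
    (dictOf a b c).contains (String.ofList [k]) = false := by
  have eA : (("A" : String) == String.ofList [k]) = false := by
    rw [beq_eq_false_iff_ne]
    intro h
    exact hA ((single_eq 'A' k).mp h).symm
  have eB : (("B" : String) == String.ofList [k]) = false := by
    rw [beq_eq_false_iff_ne]
    intro h
    exact hB ((single_eq 'B' k).mp h).symm
  have eC : (("C" : String) == String.ofList [k]) = false := by
    rw [beq_eq_false_iff_ne]
    intro h
    exact hC ((single_eq 'C' k).mp h).symm
  cases a <;> cases b <;> cases c <;> simp [dictOf, PySem.Dict.contains, eA, eB, eC]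

theorem stepLemma (k : Char) (a b c : Bool) :
    (if (dictOf a b c).contains (String.ofList [k]) then (dictOf a b c).erase (String.ofList [k]) else dictOf a b c)
      = dictOf (a && !(k == 'A')) (b && !(k == 'B')) (c && !(k == 'C')) := by
  by_cases hA : k = 'A'
  · subst hA; cases a <;> cases b <;> cases c <;> decide
  · by_cases hB : k = 'B'
    · subst hB; cases a <;> cases b <;> cases c <;> decide
    · by_cases hC : k = 'C'
      · subst hC; cases a <;> cases b <;> cases c <;> decide
      · rw [contains_other k a b c hA hB hC]
        have e1 : (k == 'A') = false := by simpa using hA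
        have e2 : (k == 'B') = false := by simpa using hB
        have e3 : (k == 'C') = false := by simpa using hC
        rw [if_neg (by simp)]
        rw [e1, e2, e3]
        simp

theorem sizeZero (a b c : Bool) (h : (dictOf a b c).size = 0) : a = false ∧ b = false ∧ c = false := by
  revert h; cases a <;> cases b <;> cases c <;> decide

theorem flagEq (k : Char) (rest : List Char) (x : Bool) (ch : Char) :
    (x && !((k :: rest).contains ch)) = ((x && !(k == ch)) && !rest.contains ch) := by
  cases x with
  | false => simp
  | true =>
      simp only [List.contains_cons, Bool.not_or, Bool.true_and]
      by_cases hk : k = ch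
      · subst hk; simp
      · have h0 : (ch == k) = false := by simpa using (Ne.symm hk)
        have h1 : (k == ch) = false := by simpa using hk
        rw [h0, h1]

theorem loop3 (cs : List Char) : ∀ a b c,
    findabcLoop (dictOf a b c) cs =
      dictOf (a && !cs.contains 'A') (b && !cs.contains 'B') (c && !cs.contains 'C') := by
  induction cs with
  | nil => intro a b c; simp [findabcLoop]
  | cons k rest ih =>
    intro a b c
    rw [findabcLoop, stepLemma, flagEq, flagEq, flagEq]
    split_ifs with hz
    · obtain ⟨ha, hb, hc⟩ := sizeZero _ _ _ hz
      rw [ha, hb, hc]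
      simp
    · exact ih _ _ _

-- ===== VERDICT (by name: the statement is the Claim_ definition above) =====
theorem findabc_spec : Claim_equal_findabc := by
  intro s _
  show findabc s = findabc_alt s
  have hinit : PySem.Dict.ofList ([("A", 1), ("B", 1), ("C", 1)] : List (String × Int)) = dictOf true true true := by decide
  rw [findabc, hinit, loop3 s.toList true true true]
  by_cases hA : 'A' ∈ s.toList <;> by_cases hB : 'B' ∈ s.toList <;> by_cases hC : 'C' ∈ s.toList <;>
    simp [findabc_alt, dictOf, PySem.Dict.items, hA, hB, hC]
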